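-- pv_equiv track=rewrite | github.com/hyastar/learn | test/YTU/ytu.py | get_xencode
-- ===== SOURCE A (Python) =====
-- import math
--
-- def ordat(msg, idx):
--     return ord(msg[idx]) if idx < len(msg) else 0
--
-- def sencode(msg, key):
--     l = len(msg)
--     pwd = []
--     for i in range(0, l, 4):
--         pwd.append(
--             ordat(msg, i)
--             | ordat(msg, i + 1) << 8
--             | ordat(msg, i + 2) << 16
--             | ordat(msg, i + 3) << 24
--         )
--     if key:
--         pwd.append(l)
--     return pwd
--
-- def lencode(msg, key):
--     l = len(msg)
--     ll = (l - 1) << 2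
--     if key:
--         m = msg[l - 1]
--         if m < ll - 3 or m > ll:
--             return
--         ll = m
--     for i in range(0, l):
--         msg[i] = (
--             chr(msg[i] & 0xFF)
--             + chr(msg[i] >> 8 & 0xFF)
--             + chr(msg[i] >> 16 & 0xFF)
--             + chr(msg[i] >> 24 & 0xFF)
--         )
--     return "".join(msg)[:ll] if key else "".join(msg)
--
-- def get_xencode(msg, key):
--     if msg == "":
--         return ""
--     pwd = sencode(msg, True)
--     pwdk = sencode(key, False)
--     if len(pwdk) < 4:
--         pwdk += [0] * (4 - len(pwdk))
--     n = len(pwd) - 1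
--     z = pwd[n]
--     y = pwd[0]
--     c = 0x86014019 | 0x183639A0
--     q = math.floor(6 + 52 / (n + 1))
--     d = 0
--     while q > 0:
--         d = d + c & (0x8CE0D9BF | 0x731F2640)
--         e = d >> 2 & 3
--         for p in range(0, n):
--             y = pwd[p + 1]
--             m = (z >> 5 ^ y << 2) + ((y >> 3 ^ z << 4) ^ (d ^ y)) + (pwdk[(p & 3) ^ e] ^ z)
--             pwd[p] = pwd[p] + m & (0xEFB8D130 | 0x10472ECF)
--             z = pwd[p]
--         y = pwd[0]
--         m = (z >> 5 ^ y << 2) + ((y >> 3 ^ z << 4) ^ (d ^ y)) + (pwdk[(n & 3) ^ e] ^ z)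
--         pwd[n] = pwd[n] + m & (0xBB390742 | 0x44C6F8BD)
--         z = pwd[n]
--         q -= 1
--     return lencode(pwd, False)
-- ===== SOURCE B (Python) =====
-- def get_xencode(msg, key):
--     if msg == "":
--         return ""
--
--     def words(s):
--         return [int.from_bytes(s[i:i + 4].encode("latin-1"), "little")
--                 for i in range(0, len(s), 4)]
--
--     data = words(msg) + [len(msg)]
--     sk = (words(key) + [0, 0, 0, 0])[:4]
--     d = 0
--     z = data[-1]
--     for _ in range(6 + 52 // len(data)):
--         d = (d + 0x9E3779B9) & 0xFFFFFFFF
--         e = (d >> 2) & 3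
--         out = []
--         rest = data[::-1]  # consume the words front-to-back via O(1) pops
--         p = 0
--         while rest:
--             w = rest.pop()
--             y = rest[-1] if rest else (out[0] if out else w)
--             m = (z >> 5 ^ y << 2) + ((y >> 3 ^ z << 4) ^ (d ^ y)) + (sk[(p & 3) ^ e] ^ z)
--             z = (w + m) & 0xFFFFFFFF
--             out.append(z)
--             p += 1
--         data = out
--     return "".join(w.to_bytes(4, "little").decode("latin-1") for w in data)
-- ===== Notes on version B (the rewrite author's own statement) =====
-- stated objective: alternative
-- what changed: B replaces A's in-place indexed mutation (a fold writing pwd[p] by index over range(0,n) plus a separately coded wrap-around step for pwd[n]) with a purely functional round that consumes the word list element by element and rebuilds a fresh list, reading the neighbour word from the unconsumed suffix (or the head of the rebuilt prefix at the wrap) so no list indexing or tail special-case remains; it also packs words with int.from_bytes on string chunks, fixes the key schedule to exactly 4 words via (...+[0,0,0,0])[:4], and writes the obfuscated OR-ed constants literally.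
import Mathlib
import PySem

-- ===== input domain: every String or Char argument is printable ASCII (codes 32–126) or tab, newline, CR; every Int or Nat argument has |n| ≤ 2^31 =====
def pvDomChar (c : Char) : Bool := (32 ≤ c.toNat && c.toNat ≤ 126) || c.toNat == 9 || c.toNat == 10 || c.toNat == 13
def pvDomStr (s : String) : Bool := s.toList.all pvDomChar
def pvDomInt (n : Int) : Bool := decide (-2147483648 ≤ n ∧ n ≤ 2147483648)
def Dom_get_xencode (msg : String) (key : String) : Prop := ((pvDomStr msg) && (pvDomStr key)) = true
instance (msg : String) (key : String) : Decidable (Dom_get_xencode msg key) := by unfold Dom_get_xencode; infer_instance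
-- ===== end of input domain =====

-- B replaces A's in-place indexed round (fold writing pwd[p] plus a separately coded wrap step for
-- pwd[n]) with a purely functional round that consumes the word list and rebuilds a fresh one,
-- reading the neighbour from the unconsumed suffix (or the rebuilt prefix at the wrap), with no
-- list indexing (objective: alternative; not faster).

-- ===== PORT A =====
-- ord(msg[idx]): every call site passes 0 ≤ idx, where pyGetD under the `idx < len` guard is exact
def ordatA (msg : List Char) (idx : Int) : Int :=
  if idx < (msg.length : Int) then ((PySem.List.pyGetD msg idx (Char.ofNat 0)).toNat : Int) else 0

def sencodeA (msg : List Char) (key : Bool) : List Int :=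
  let l : Int := (msg.length : Int)
  let pwd := (PySem.List.pyRange 0 l 4).foldl
    (fun pwd i => pwd ++ [PySem.Int.bor (PySem.Int.bor (PySem.Int.bor (ordatA msg i)
        (ordatA msg (i + 1) <<< (8 : Nat))) (ordatA msg (i + 2) <<< (16 : Nat)))
        (ordatA msg (i + 3) <<< (24 : Nat))])
    ([] : List Int)
  if key then pwd ++ [l] else pwd

-- get_xencode calls lencode with key=False only; the key=True branch rebinds list elements from int
-- to str (a heterogeneous list, not representable under the type convention) and is unreachable, so
-- the key=False path is ported: the in-place `for i in range(l): msg[i] = …` rewrite visits the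
-- elements in list order, ported as a fold collecting the converted words in the same order;
-- chr(n) is Char.ofNat n.toNat, exact for the byte values 0..255 produced here.
def lencodeA (msg : List Int) : String :=
  let strs := msg.foldl (fun acc w => acc ++ [[
      Char.ofNat (PySem.Int.band w 0xFF).toNat,
      Char.ofNat (PySem.Int.band (w >>> (8 : Nat)) 0xFF).toNat,
      Char.ofNat (PySem.Int.band (w >>> (16 : Nat)) 0xFF).toNat,
      Char.ofNat (PySem.Int.band (w >>> (24 : Nat)) 0xFF).toNat]]) ([] : List (List Char))
  String.ofList (PySem.Chars.join [] strs)

-- body of `for p in range(0, n)`; state (pwd, z, y); the indices p, p+1 lie in range, pyGetD/pySetD exact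
def innerStepA (pwdk : List Int) (d e : Int) (st : List Int × Int × Int) (p : Int) :
    List Int × Int × Int :=
  let pwd := st.1
  let z := st.2.1
  let y := PySem.List.pyGetD pwd (p + 1) 0
  let m := PySem.Int.bxor (z >>> (5 : Nat)) (y <<< (2 : Nat))
      + PySem.Int.bxor (PySem.Int.bxor (y >>> (3 : Nat)) (z <<< (4 : Nat))) (PySem.Int.bxor d y)
      + PySem.Int.bxor (PySem.List.pyGetD pwdk (PySem.Int.bxor (PySem.Int.band p 3) e) 0) z
  let pwd' := PySem.List.pySetD pwd p
      (PySem.Int.band (PySem.List.pyGetD pwd p 0 + m) (PySem.Int.bor 0xEFB8D130 0x10472ECF))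
  (pwd', PySem.List.pyGetD pwd' p 0, y)

-- one iteration of `while q > 0`; state (pwd, z, y, d)
def roundA (pwdk : List Int) (n c : Int) (st : List Int × Int × Int × Int) :
    List Int × Int × Int × Int :=
  let d := PySem.Int.band (st.2.2.2 + c) (PySem.Int.bor 0x8CE0D9BF 0x731F2640)
  let e := PySem.Int.band (d >>> (2 : Nat)) 3
  let s1 := (PySem.List.pyRange 0 n 1).foldl (innerStepA pwdk d e) (st.1, st.2.1, st.2.2.1)
  let pwd := s1.1
  let z := s1.2.1
  let y := PySem.List.pyGetD pwd 0 0
  let m := PySem.Int.bxor (z >>> (5 : Nat)) (y <<< (2 : Nat))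
      + PySem.Int.bxor (PySem.Int.bxor (y >>> (3 : Nat)) (z <<< (4 : Nat))) (PySem.Int.bxor d y)
      + PySem.Int.bxor (PySem.List.pyGetD pwdk (PySem.Int.bxor (PySem.Int.band n 3) e) 0) z
  let pwd' := PySem.List.pySetD pwd n
      (PySem.Int.band (PySem.List.pyGetD pwd n 0 + m) (PySem.Int.bor 0xBB390742 0x44C6F8BD))
  (pwd', PySem.List.pyGetD pwd' n 0, y, d)

-- `while q > 0: …; q -= 1`, as recursion on the (positive) counter
def loopA (pwdk : List Int) (n c : Int) : Nat → (List Int × Int × Int × Int) → List Int × Int × Int × Int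
  | 0, st => st
  | q + 1, st => loopA pwdk n c q (roundA pwdk n c st)

def get_xencode (msg : String) (key : String) : String :=
  if msg = "" then "" else
  let pwd := sencodeA msg.toList true
  let pwdk0 := sencodeA key.toList false
  let pwdk := if pwdk0.length < 4 then
      pwdk0 ++ PySem.List.pyRepeat [(0 : Int)] (4 - (pwdk0.length : Int)) else pwdk0
  let n : Int := (pwd.length : Int) - 1
  let z := PySem.List.pyGetD pwd n 0
  let y := PySem.List.pyGetD pwd 0 0
  let c := PySem.Int.bor 0x86014019 0x183639A0
  -- math.floor(6 + 52/(n+1)): exact as the integer 6 + 52//(n+1): 52/(n+1) ≤ 26, so the double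
  -- rounding error (< 2^-46) is far smaller than the distance 1/(n+1) to the next integer
  let q := 6 + PySem.Int.floordiv 52 (n + 1)
  let fin := loopA pwdk n c q.toNat (pwd, z, y, 0)
  lencodeA fin.1

-- ===== PORT B =====
-- int.from_bytes(chunk, "little"): the base-256 little-endian value of the bytes; each byte is
-- < 256, so or-accumulating over the reversed chunk computes exactly that value; s.encode("latin-1")
-- maps each char to the byte of its code, exact here (codes ≤ 255 on the stated domain)
def fromBytesLE (bs : List Char) : Int :=
  bs.reverse.foldl (fun w c => PySem.Int.bor (w <<< (8 : Nat)) ((c.toNat : Int))) 0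

-- words(s): [int.from_bytes(s[i:i+4].encode("latin-1"), "little") for i in range(0, len(s), 4)]
def wordsB (s : List Char) : List Int :=
  (PySem.List.pyRange 0 (s.length : Int) 4).map
    (fun i => fromBytesLE (PySem.List.slice s (some i) (some (i + 4))))

-- the `while rest:` loop: `rest = data[::-1]` then `w = rest.pop()` consumes the words
-- front-to-back, so the port consumes the forward list directly (rest[-1] = head of the
-- forward remainder); each new word is appended to `out`, z and p are threaded;
-- y = rest[-1] if rest else (out[0] if out else w)
def innerB (sk : List Int) (d e : Int) : List Int → List Int → Int → Int → List Int × Int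
  | [], out, z, _p => (out, z)
  | w :: rest, out, z, p =>
      let y : Int := match rest with
        | r :: _ => r
        | [] => match out with
          | o :: _ => o
          | [] => w
      let m := PySem.Int.bxor (z >>> (5 : Nat)) (y <<< (2 : Nat))
          + PySem.Int.bxor (PySem.Int.bxor (y >>> (3 : Nat)) (z <<< (4 : Nat))) (PySem.Int.bxor d y)
          + PySem.Int.bxor (PySem.List.pyGetD sk (PySem.Int.bxor (PySem.Int.band p 3) e) 0) z
      let z' := PySem.Int.band (w + m) 0xFFFFFFFF
      innerB sk d e rest (out ++ [z']) z' (p + 1)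

-- one iteration of `for _ in range(…)`; state (data, z, d)
def roundBalt (sk : List Int) (st : List Int × Int × Int) : List Int × Int × Int :=
  let d := PySem.Int.band (st.2.2 + 0x9E3779B9) 0xFFFFFFFF
  let e := PySem.Int.band (d >>> (2 : Nat)) 3
  let r := innerB sk d e st.1 [] st.2.1 0
  (r.1, r.2, d)

-- w.to_bytes(4, 'little').decode('latin-1'): the 4 little-endian bytes of w (here 0 ≤ w < 2^32),
-- each byte decoded to the character of its code; exact for these values
def bytesB (w : Int) : List Char :=
  [Char.ofNat (PySem.Int.band w 0xFF).toNat,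
   Char.ofNat (PySem.Int.band (w >>> (8 : Nat)) 0xFF).toNat,
   Char.ofNat (PySem.Int.band (w >>> (16 : Nat)) 0xFF).toNat,
   Char.ofNat (PySem.Int.band (w >>> (24 : Nat)) 0xFF).toNat]

def get_xencode_alt (msg : String) (key : String) : String :=
  if msg = "" then "" else
  let data := wordsB msg.toList ++ [(msg.toList.length : Int)]
  let sk := PySem.List.slice (wordsB key.toList ++ [0, 0, 0, 0]) none (some 4)
  let z := PySem.List.pyGetD data (-1) 0
  let q := 6 + PySem.Int.floordiv 52 (data.length : Int)
  let fin := (PySem.List.pyRange 0 q 1).foldl (fun st _ => roundBalt sk st) (data, z, 0)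
  String.ofList (PySem.Chars.join [] (fin.1.map bytesB))

-- ===== PRECONDITION & SPEC =====
def Spec_get_xencode (msg : String) (key : String) (out : String) : Prop := out = get_xencode_alt msg key
instance (msg : String) (key : String) (out : String) : Decidable (Spec_get_xencode msg key out) := by unfold Spec_get_xencode; infer_instance

-- ===== CLAIM (what is proved, stated in full; the proofs are below) =====
def Claim_equal_get_xencode : Prop := ∀ (msg : String) (key : String), Dom_get_xencode msg key → Spec_get_xencode msg key (get_xencode msg key)

-- ===== LEMMAS AND PROOFS =====

-- A's tail step of a round (masks already simplified to 0xFFFFFFFF), as a function of the fold state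
def tailStepA (pwdk : List Int) (d e n : Int) (st : List Int × Int × Int) : List Int × Int :=
  let pwd := st.1
  let z := st.2.1
  let y := PySem.List.pyGetD pwd 0 0
  let m := PySem.Int.bxor (z >>> (5 : Nat)) (y <<< (2 : Nat))
      + PySem.Int.bxor (PySem.Int.bxor (y >>> (3 : Nat)) (z <<< (4 : Nat))) (PySem.Int.bxor d y)
      + PySem.Int.bxor (PySem.List.pyGetD pwdk (PySem.Int.bxor (PySem.Int.band n 3) e) 0) z
  let pwd' := PySem.List.pySetD pwd n
      (PySem.Int.band (PySem.List.pyGetD pwd n 0 + m) 0xFFFFFFFF)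
  (pwd', PySem.List.pyGetD pwd' n 0)

theorem pv_band3 (a : Int) (h : 0 ≤ a) : 0 ≤ PySem.Int.band a 3 ∧ PySem.Int.band a 3 < 4 := by
  rw [PySem.Int.band_of_nonneg h (by norm_num)]
  have := Nat.and_le_right (n := a.toNat) (m := (3:Int).toNat)
  constructor <;> [positivity; omega]

theorem pv_bxor4 (a b : Int) (ha : 0 ≤ a ∧ a < 4) (hb : 0 ≤ b ∧ b < 4) :
    0 ≤ PySem.Int.bxor a b ∧ PySem.Int.bxor a b < 4 := by
  rw [PySem.Int.bxor_of_nonneg ha.1 hb.1]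
  have h4 : a.toNat < 2 ^ 2 := by omega
  have h5 : b.toNat < 2 ^ 2 := by omega
  have := Nat.xor_lt_two_pow h4 h5
  constructor <;> omega

theorem pv_getD_append_len (out : List Int) (w : Int) (rest : List Int) :
    PySem.List.pyGetD (out ++ w :: rest) ((out.length : Int)) 0 = w := by
  rw [PySem.List.pyGetD_natCast]
  simp [List.getD_eq_getElem?_getD, List.getElem?_append_right (le_refl out.length)]

theorem pv_setD_append (out : List Int) (w v : Int) (rest : List Int) :
    PySem.List.pySetD (out ++ w :: rest) ((out.length : Int)) v = out ++ v :: rest := by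
  rw [PySem.List.pySetD_natCast]
  induction out with
  | nil => rfl
  | cons o out' ih => simp [List.set, ih]

theorem pv_getD_zero_append (out : List Int) (w : Int) :
    PySem.List.pyGetD (out ++ [w]) 0 0 =
      (match out with | o :: _ => o | [] => (w : Int)) := by
  cases out <;> simp [PySem.List.pyGetD_zero]

theorem pv_innerB_len (sk : List Int) (d e : Int) :
    ∀ (rest out : List Int) (z p : Int),
      (innerB sk d e rest out z p).1.length = out.length + rest.length := by
  intro rest
  induction rest with
  | nil => intro out z p; simp [innerB]
  | cons w rest' ih =>
      intro out z p
      simp only [innerB]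
      rw [ih]
      simp
      omega

theorem pv_zip (pwdk sk : List Int) (d e n : Int)
    (hk : ∀ t : Int, 0 ≤ t → t < 4 → PySem.List.pyGetD pwdk t 0 = PySem.List.pyGetD sk t 0)
    (he : 0 ≤ e ∧ e < 4) :
    ∀ (rest out : List Int) (z y : Int), rest ≠ [] →
      ((out.length : Int) + (rest.length : Int) = n + 1) →
      tailStepA pwdk d e n
          ((PySem.List.pyRange (out.length : Int) n 1).foldl (innerStepA pwdk d e)
            (out ++ rest, z, y))
        = innerB sk d e rest out z (out.length : Int) := by
  intro rest
  induction rest with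
  | nil => intro out z y hne _; exact absurd rfl hne
  | cons w rest' ih =>
    intro out z y _ hlen
    have hp0 : (0:Int) ≤ (out.length : Int) := by positivity
    have ht := pv_bxor4 _ e (pv_band3 (out.length : Int) hp0) he
    have hkk := hk _ ht.1 ht.2
    cases rest' with
    | nil =>
        have hpn : (out.length : Int) = n := by
          simp only [List.length_cons, List.length_nil] at hlen; push_cast at hlen; omega
        rw [← hpn, PySem.List.pyRange_one_eq_nil (le_refl _)]
        simp only [List.foldl_nil, tailStepA, innerB, hkk,
          pv_getD_zero_append, pv_getD_append_len, pv_setD_append]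
    | cons r rest'' =>
        have hlt : (out.length : Int) < n := by
          simp only [List.length_cons] at hlen; push_cast at hlen; omega
        have hmask : PySem.Int.bor 0xEFB8D130 0x10472ECF = (0xFFFFFFFF:Int) := by decide
        rw [PySem.List.pyRange_one_cons hlt]
        simp only [List.foldl_cons, innerStepA, hmask, hkk]
        have e1 : PySem.List.pyGetD (out ++ w :: r :: rest'') ((out.length:Int) + 1) 0 = r := by
          rw [show out ++ w :: r :: rest'' = (out ++ [w]) ++ r :: rest'' by simp,
              show ((out.length:Int)+1) = (((out ++ [w]).length : Nat) : Int) by simp]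
          exact pv_getD_append_len _ _ _
        rw [e1, pv_getD_append_len, pv_setD_append, pv_getD_append_len]
        set V := PySem.Int.band (w + (PySem.Int.bxor (z >>> (5 : Nat)) (r <<< (2 : Nat))
            + PySem.Int.bxor (PySem.Int.bxor (r >>> (3 : Nat)) (z <<< (4 : Nat)))
              (PySem.Int.bxor d r)
            + PySem.Int.bxor
              (PySem.List.pyGetD sk (PySem.Int.bxor (PySem.Int.band (out.length : Int) 3) e) 0)
              z)) 0xFFFFFFFF with hV
        rw [show out ++ V :: r :: rest'' = (out ++ [V]) ++ r :: rest'' by simp]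
        have hlc : (((out ++ [V]).length : Nat) : Int) = (out.length : Int) + 1 := by simp
        rw [← hlc]
        rw [ih (out ++ [V]) V r (by simp) (by
          simp only [List.length_append, List.length_cons, List.length_nil] at hlen ⊢
          push_cast at hlen ⊢
          omega)]
        rw [hlc]
        rfl
def pvR (L : Nat) (sa : List Int × Int × Int × Int) (sb : List Int × Int × Int) : Prop :=
  sa.1 = sb.1 ∧ sa.2.1 = sb.2.1 ∧ sa.2.2.2 = sb.2.2 ∧ sa.1.length = L ∧ 0 ≤ sa.2.2.2

theorem pv_round_rel (L : Nat) (pwdk sk : List Int) (n : Int)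
    (hn : (L : Int) = n + 1) (hn0 : 0 ≤ n)
    (hk : ∀ t : Int, 0 ≤ t → t < 4 → PySem.List.pyGetD pwdk t 0 = PySem.List.pyGetD sk t 0)
    (sa : List Int × Int × Int × Int) (sb : List Int × Int × Int)
    (h : pvR L sa sb) :
    pvR L (roundA pwdk n (PySem.Int.bor 0x86014019 0x183639A0) sa) (roundBalt sk sb) := by
  obtain ⟨pwdA, zA, yA, dA⟩ := sa
  obtain ⟨pwdB, zB, dB⟩ := sb
  obtain ⟨h1, h2, h3, h4, h5⟩ := h
  simp only at h1 h2 h3 h4 h5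
  subst h1 h2 h3
  have hc : PySem.Int.bor 0x86014019 0x183639A0 = (0x9E3779B9 : Int) := by decide
  have hm1 : PySem.Int.bor 0x8CE0D9BF 0x731F2640 = (0xFFFFFFFF : Int) := by decide
  have hm2 : PySem.Int.bor 0xBB390742 0x44C6F8BD = (0xFFFFFFFF : Int) := by decide
  set d' := PySem.Int.band (dA + 0x9E3779B9) 0xFFFFFFFF with hd'
  have hd'0 : 0 ≤ d' := PySem.Int.band_nonneg_of_nonneg_left _ (by omega)
  set e := PySem.Int.band (d' >>> (2 : Nat)) 3 with he'
  have he : 0 ≤ e ∧ e < 4 := pv_band3 _ (Int.le_shiftRight_of_nonneg hd'0)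
  have hne : pwdA ≠ [] := by intro h0; rw [h0] at h4; simp at h4; omega
  have hlen0 : ((([] : List Int).length : Int) + (pwdA.length : Int) = n + 1) := by
    simp [h4, ← hn]
  have hz := pv_zip pwdk sk d' e n hk he pwdA [] zA yA hne hlen0
  simp only [List.nil_append, List.length_nil, Nat.cast_zero, tailStepA] at hz
  have hz1 := congrArg Prod.fst hz
  have hz2 := congrArg Prod.snd hz
  simp only at hz1 hz2
  refine ⟨?_, ?_, ?_, ?_, ?_⟩
  · simp only [roundA, roundBalt, hc, hm1, hm2, ← hd', ← he']
    exact hz1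
  · simp only [roundA, roundBalt, hc, hm1, hm2, ← hd', ← he']
    exact hz2
  · simp only [roundA, roundBalt, hc, hm1, hm2, ← hd', ← he']
  · simp only [roundA, hc, hm1, hm2, ← hd', ← he']
    rw [hz1, pv_innerB_len]
    simpa using h4
  · simp only [roundA, hc, hm1, ← hd']
    exact hd'0
theorem pv_natcast_shl (x : Nat) (n : Nat) : ((x : Int) <<< n) = ((x <<< n : Nat) : Int) := by
  simp [Nat.shiftLeft_eq, Int.shiftLeft_eq]

theorem pv_zero_bor (a : Int) : PySem.Int.bor 0 a = a := by
  rw [PySem.Int.bor_comm, PySem.Int.bor_zero]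

theorem pv_word_eq (s : List Char) (i : Int) (h0 : 0 ≤ i) :
    fromBytesLE (PySem.List.slice s (some i) (some (i + 4)))
      = PySem.Int.bor (PySem.Int.bor (PySem.Int.bor (ordatA s i)
        (ordatA s (i + 1) <<< (8 : Nat))) (ordatA s (i + 2) <<< (16 : Nat)))
        (ordatA s (i + 3) <<< (24 : Nat)) := by
  have hchunk : PySem.List.slice s (some i) (some (i + 4)) = (s.drop i.toNat).take 4 := by
    rw [PySem.List.slice_toNat s h0 (by omega)]
    congr 1
    omega
  have hord : ∀ j : Nat, j < 4 → ordatA s (i + (j : Int)) =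
      ((((s.drop i.toNat).take 4).getD j (Char.ofNat 0)).toNat : Int) := by
    intro j hj
    unfold ordatA
    by_cases hlt : i + (j : Int) < (s.length : Int)
    · rw [if_pos hlt]
      have hb : j < ((s.drop i.toNat).take 4).length := by
        simp [List.length_take, List.length_drop]
        omega
      rw [PySem.List.pyGetD_eq_getElem s _ (by omega) hlt, List.getD_eq_getElem _ _ hb]
      have h1 : ((s.drop i.toNat).take 4)[j] = s[i.toNat + j]'(by omega) := by
        simp [List.getElem_take, List.getElem_drop]
      rw [h1]
      have h2 : (i + (j : Int)).toNat = i.toNat + j := by omega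
      simp [h2]
    · rw [if_neg hlt]
      have hlen : ((s.drop i.toNat).take 4).length ≤ j := by
        simp [List.length_take, List.length_drop]
        omega
      rw [List.getD_eq_default _ _ hlen]
      rfl
  have e0 : ordatA s i = ((((s.drop i.toNat).take 4).getD 0 (Char.ofNat 0)).toNat : Int) := by
    simpa using hord 0 (by norm_num)
  have e1 : ordatA s (i + 1) = ((((s.drop i.toNat).take 4).getD 1 (Char.ofNat 0)).toNat : Int) := by
    simpa using hord 1 (by norm_num)
  have e2 : ordatA s (i + 2) = ((((s.drop i.toNat).take 4).getD 2 (Char.ofNat 0)).toNat : Int) := by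
    simpa using hord 2 (by norm_num)
  have e3 : ordatA s (i + 3) = ((((s.drop i.toNat).take 4).getD 3 (Char.ofNat 0)).toNat : Int) := by
    simpa using hord 3 (by norm_num)
  unfold fromBytesLE
  rw [hchunk, e0, e1, e2, e3]
  have hclen : ((s.drop i.toNat).take 4).length ≤ 4 := by simp
  rcases hc : (s.drop i.toNat).take 4 with _ | ⟨a, _ | ⟨b, _ | ⟨c, _ | ⟨d, _ | ⟨x, rest⟩⟩⟩⟩⟩
  · simp
  · simp only [List.reverse_cons, List.reverse_nil, List.nil_append,
      List.foldl_cons, List.foldl_nil]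
    simp [List.getD, show (Char.ofNat 0).toNat = 0 from rfl, Int.zero_shiftLeft, pv_zero_bor]
  · simp only [List.reverse_cons, List.reverse_nil, List.nil_append, List.cons_append,
      List.foldl_cons, List.foldl_nil]
    simp [List.getD, show (Char.ofNat 0).toNat = 0 from rfl, Int.zero_shiftLeft, pv_zero_bor]
    rw [PySem.Int.bor_comm]
  · simp only [List.reverse_cons, List.reverse_nil, List.nil_append, List.cons_append,
      List.foldl_cons, List.foldl_nil]
    simp [List.getD, show (Char.ofNat 0).toNat = 0 from rfl, Int.zero_shiftLeft, pv_zero_bor]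
    simp only [pv_natcast_shl, PySem.Int.bor_natCast]
    refine Int.natCast_inj.mpr ?_
    simp only [Nat.shiftLeft_or_distrib, ← Nat.shiftLeft_add]
    norm_num
    simp [Nat.or_comm, Nat.or_assoc]
  · simp only [List.reverse_cons, List.reverse_nil, List.nil_append, List.cons_append,
      List.foldl_cons, List.foldl_nil]
    simp [List.getD, Int.zero_shiftLeft, pv_zero_bor]
    simp only [pv_natcast_shl, PySem.Int.bor_natCast]
    refine Int.natCast_inj.mpr ?_
    simp only [Nat.shiftLeft_or_distrib, ← Nat.shiftLeft_add]
    norm_num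
    simp [Nat.or_comm, Nat.or_assoc]
  · rw [hc] at hclen
    simp at hclen
    omega

theorem pv_key_getD (kw : List Int) (t : Int) (h0 : 0 ≤ t) (h4 : t < 4) :
    PySem.List.pyGetD (if kw.length < 4 then
        kw ++ PySem.List.pyRepeat [(0 : Int)] (4 - (kw.length : Int)) else kw) t 0
      = PySem.List.pyGetD (PySem.List.slice (kw ++ [0, 0, 0, 0]) none (some 4)) t 0 := by
  have ht : t = ((t.toNat : Nat) : Int) := by omega
  rw [ht, PySem.List.pyGetD_natCast, PySem.List.pyGetD_natCast]
  rw [PySem.List.slice_to (kw ++ [0, 0, 0, 0]) (by norm_num)]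
  rw [PySem.List.pyRepeat_singleton]
  have htn : t.toNat < 4 := by omega
  simp only [List.getD_eq_getElem?_getD]
  rw [show (Int.toNat 4) = 4 from rfl, List.getElem?_take_of_lt htn]
  by_cases hlt : t.toNat < kw.length
  · rw [List.getElem?_append_left hlt]
    split_ifs with h1
    · rw [List.getElem?_append_left hlt]
    · rfl
  · have hk4 : kw.length < 4 := by omega
    rw [if_pos hk4, List.getElem?_append_right (by omega), List.getElem?_append_right (by omega),
      List.getElem?_replicate_of_lt (by omega)]
    have hb : t.toNat - kw.length < 4 := by omega
    have : [(0:Int), 0, 0, 0][t.toNat - kw.length]? = some 0 := by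
      rcases (by omega : t.toNat - kw.length = 0 ∨ t.toNat - kw.length = 1 ∨
        t.toNat - kw.length = 2 ∨ t.toNat - kw.length = 3) with h | h | h | h <;> rw [h] <;> rfl
    rw [this]

theorem pv_loop_rel (L : Nat) (pwdk sk : List Int) (n : Int)
    (hn : (L : Int) = n + 1) (hn0 : 0 ≤ n)
    (hk : ∀ t : Int, 0 ≤ t → t < 4 → PySem.List.pyGetD pwdk t 0 = PySem.List.pyGetD sk t 0)
    (k : Nat) (sa : List Int × Int × Int × Int) (sb : List Int × Int × Int)
    (h : pvR L sa sb) :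
    pvR L (loopA pwdk n (PySem.Int.bor 0x86014019 0x183639A0) k sa)
      ((roundBalt sk)^[k] sb) := by
  induction k generalizing sa sb with
  | zero => exact h
  | succ k ih =>
      rw [Function.iterate_succ_apply]
      exact ih _ _ (pv_round_rel L pwdk sk n hn hn0 hk sa sb h)

theorem pv_fold_const {α : Type} (f : α → α) (l : List Int) (s : α) :
    l.foldl (fun st _ => f st) s = f^[l.length] s := by
  induction l generalizing s with
  | nil => rfl
  | cons x xs ih => simp [List.foldl_cons, ih, Function.iterate_succ_apply]

theorem pv_main (msg : String) (key : String) : get_xencode msg key = get_xencode_alt msg key := by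
  by_cases hm : msg = ""
  · simp [get_xencode, get_xencode_alt, hm]
  · simp only [get_xencode, get_xencode_alt, if_neg hm]
    have hdata : sencodeA msg.toList true = wordsB msg.toList ++ [(msg.toList.length : Int)] := by
      unfold sencodeA wordsB
      rw [if_pos rfl]
      simp only [PySem.List.foldl_append_singleton_eq_map, List.nil_append]
      congr 1
      refine List.map_congr_left (fun i hi => ?_)
      have := (PySem.List.mem_pyRange_iff_of_pos (by norm_num) i).1 hi
      exact (pv_word_eq msg.toList i this.1).symm
    have hkw : sencodeA key.toList false = wordsB key.toList := by
      unfold sencodeA wordsB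
      rw [if_neg (by decide)]
      simp only [PySem.List.foldl_append_singleton_eq_map, List.nil_append]
      refine List.map_congr_left (fun i hi => ?_)
      have := (PySem.List.mem_pyRange_iff_of_pos (by norm_num) i).1 hi
      exact (pv_word_eq key.toList i this.1).symm
    rw [hdata, hkw]
    set kw := wordsB key.toList with hkwd
    set dataB := wordsB msg.toList ++ [(msg.toList.length : Int)] with hdBd
    have hkey : ∀ t : Int, 0 ≤ t → t < 4 →
        PySem.List.pyGetD (if kw.length < 4 then
          kw ++ PySem.List.pyRepeat [(0 : Int)] (4 - (kw.length : Int)) else kw) t 0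
        = PySem.List.pyGetD (PySem.List.slice (kw ++ [0, 0, 0, 0]) none (some 4)) t 0 :=
      fun t h0 h4 => pv_key_getD kw t h0 h4
    have hn : ((dataB.length : Nat) : Int) = ((dataB.length : Int) - 1) + 1 := by omega
    have hn0 : (0 : Int) ≤ (dataB.length : Int) - 1 := by
      have : 0 < dataB.length := by simp [hdBd]
      omega
    have hzA : PySem.List.pyGetD dataB ((dataB.length : Int) - 1) 0 = (msg.toList.length : Int) := by
      rw [hdBd]
      rw [show ((((wordsB msg.toList ++ [(msg.toList.length : Int)]).length : Nat) : Int) - 1)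
          = (((wordsB msg.toList).length : Nat) : Int) by simp]
      exact pv_getD_append_len _ _ _
    have hzB : PySem.List.pyGetD dataB (-1) 0 = (msg.toList.length : Int) := by
      rw [hdBd]
      exact PySem.List.pyGetD_neg_one_append_singleton _ _ _
    rw [hzA, hzB]
    rw [show ((dataB.length : Int) - 1) + 1 = ((dataB.length : Nat) : Int) by ring]
    rw [pv_fold_const, PySem.List.length_pyRange_one]
    rw [show ((6 + PySem.Int.floordiv 52 ((dataB.length : Nat) : Int)) - 0).toNat
        = (6 + PySem.Int.floordiv 52 ((dataB.length : Nat) : Int)).toNat by norm_num]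
    have hrel := pv_loop_rel dataB.length
      (if kw.length < 4 then kw ++ PySem.List.pyRepeat [(0 : Int)] (4 - (kw.length : Int)) else kw)
      (PySem.List.slice (kw ++ [0, 0, 0, 0]) none (some 4))
      ((dataB.length : Int) - 1) hn hn0 hkey
      (6 + PySem.Int.floordiv 52 ((dataB.length : Nat) : Int)).toNat
      (dataB, (msg.toList.length : Int), PySem.List.pyGetD dataB 0 0, 0)
      (dataB, (msg.toList.length : Int), 0)
      ⟨rfl, rfl, rfl, rfl, le_refl 0⟩
    rw [hrel.1]
    unfold lencodeA
    simp only [PySem.List.foldl_append_singleton_eq_map, List.nil_append]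
    rfl

-- ===== VERDICT (by name: the statement is the Claim_ definition above) =====
theorem get_xencode_spec : Claim_equal_get_xencode := by
  intro msg key _
  unfold Spec_get_xencode
  exact pv_main msg key
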